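-- pv_equiv track=rewrite | github.com/broberr/STMProjectUPDATED | video_stm_activity/src/run_infer.py | pick_closest_label
-- ===== SOURCE A (Python) =====
-- from typing import Optional, Dict, List, Tuple
--
-- def pick_closest_label(scores: Dict[str, int]) -> str:
--     best_label, best_score = max(scores.items(), key=lambda kv: kv[1])
--     if best_score == 0:
--         return "using_computer"
--
--     specificity_order = ["video_call", "phone_use", "eating_drinking", "meeting", "using_computer"]
--     tied = [k for k, v in scores.items() if v == best_score]
--     for lab in specificity_order:
--         if lab in tied:
--             return lab
--     return best_label
-- ===== SOURCE B (Python) =====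
-- def pick_closest_label(scores):
--     specificity_order = ["video_call", "phone_use", "eating_drinking", "meeting", "using_computer"]
--     rank = {lab: len(specificity_order) - i for i, lab in enumerate(specificity_order)}
--     label, score = max(scores.items(), key=lambda kv: (kv[1], rank.get(kv[0], 0)))
--     return "using_computer" if score == 0 else label
-- ===== Notes on version B (the rewrite author's own statement) =====
-- stated objective: simpler
-- what changed: Replaces A's three-stage pipeline (max by score, build tied-label list, scan the specificity order) with a single max over items under a composite (score, specificity-rank) key, keeping the best_score==0 guard; Pre_ only excludes the empty dict, on which both raise ValueError.
import Mathlib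
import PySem

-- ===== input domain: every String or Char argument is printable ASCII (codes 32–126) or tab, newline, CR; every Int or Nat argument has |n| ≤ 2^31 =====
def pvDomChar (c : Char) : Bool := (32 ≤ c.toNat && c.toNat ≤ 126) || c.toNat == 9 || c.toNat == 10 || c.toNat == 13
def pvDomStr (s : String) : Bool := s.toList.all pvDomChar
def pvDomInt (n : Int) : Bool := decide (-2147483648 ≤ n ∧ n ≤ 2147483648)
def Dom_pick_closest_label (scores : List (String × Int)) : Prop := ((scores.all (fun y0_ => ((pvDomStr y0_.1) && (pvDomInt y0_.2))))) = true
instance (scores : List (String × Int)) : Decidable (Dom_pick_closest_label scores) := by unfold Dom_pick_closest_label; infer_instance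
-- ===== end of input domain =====

-- B replaces A's max-then-tied-list-then-specificity-scan pipeline by a single max under a
-- composite (score, specificity-rank) key; objective: simpler (same O(n) cost).


-- ===== PORT A =====
def pick_closest_label (scores : List (String × Int)) : String :=
  match PySem.List.max? scores (fun kv => kv.2) with
  | none => ""   -- max() on an empty dict raises ValueError; excluded by Pre_
  | some best =>
    if best.2 == 0 then "using_computer"
    else
      let specificity_order : List String :=
        ["video_call", "phone_use", "eating_drinking", "meeting", "using_computer"]
      let tied := (scores.filter (fun kv => kv.2 == best.2)).map (fun kv => kv.1)
      match specificity_order.find? (fun lab => tied.contains lab) with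
      | some lab => lab
      | none => best.1

-- ===== PORT B =====
-- rank = {lab: len(specificity_order) - i for i, lab in enumerate(specificity_order)}
def pvRank : PySem.Dict String Int :=
  PySem.Dict.ofList
    [("video_call", 5), ("phone_use", 4), ("eating_drinking", 3), ("meeting", 2), ("using_computer", 1)]

def pick_closest_label_alt (scores : List (String × Int)) : String :=
  match PySem.List.max2? scores (fun kv => kv.2) (fun kv => pvRank.getD kv.1 0) with
  | none => ""   -- max() on an empty dict raises ValueError; excluded by Pre_
  | some best => if best.2 == 0 then "using_computer" else best.1

-- ===== PRECONDITION & SPEC =====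
-- Pre_ excludes only the empty dict, on which A's max(scores.items()) raises ValueError.
def Pre_pick_closest_label (scores : List (String × Int)) : Prop := scores ≠ []
instance (scores : List (String × Int)) : Decidable (Pre_pick_closest_label scores) := by
  unfold Pre_pick_closest_label; infer_instance
def pvWitness_pick_closest_label : (List (String × Int)) := [("phone_use", 2), ("meeting", 2)]

def Spec_pick_closest_label (scores : List (String × Int)) (out : String) : Prop := out = pick_closest_label_alt scores
instance (scores : List (String × Int)) (out : String) : Decidable (Spec_pick_closest_label scores out) := by unfold Spec_pick_closest_label; infer_instance

-- ===== CLAIM (what is proved, stated in full; the proofs are below) =====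
def Claim_equal_pick_closest_label : Prop := ∀ (scores : List (String × Int)), Dom_pick_closest_label scores → Pre_pick_closest_label scores → Spec_pick_closest_label scores (pick_closest_label scores)

-- ===== LEMMAS AND PROOFS =====

theorem pvFindCongr {α : Type} (l : List α) (p q : α → Bool) (h : ∀ y ∈ l, p y = q y) :
    l.find? p = l.find? q := by
  induction l with
  | nil => rfl
  | cons x t ih =>
    simp only [List.find?]
    rw [h x (List.mem_cons_self)]
    cases q x with
    | true => rfl
    | false => exact ih (fun y hy => h y (List.mem_cons_of_mem _ hy))

theorem pvArgmaxFold {α κ : Type} [LinearOrder κ] (key : α → κ) :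
    ∀ (t : List α) (m : α),
      t.foldl (fun acc x => match acc with
        | none => some x
        | some mm => if key mm < key x then some x else some mm) (some m)
      = (m :: t).find? (fun y => decide (∀ z ∈ m :: t, key z ≤ key y)) := by
  intro t
  induction t with
  | nil =>
    intro m
    simp [List.find?]
  | cons x t' ih =>
    intro m
    simp only [List.foldl]
    by_cases hx : key m < key x
    · rw [if_pos hx]
      rw [ih x]
      -- goal: find? (x :: t') bigpred' = find? (m :: x :: t') bigpred
      have hm : (decide (∀ z ∈ m :: x :: t', key z ≤ key m)) = false := by
        simp only [decide_eq_false_iff_not]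
        intro hall
        exact absurd (hall x (by simp)) (not_le.mpr hx)
      conv_rhs => rw [List.find?]
      rw [hm]
      apply pvFindCongr
      intro y hy
      apply decide_eq_decide.mpr
      constructor
      · intro hall z hz
        rcases List.mem_cons.mp hz with rfl | hz'
        · exact le_trans (le_of_lt hx) (hall x (by simp))
        · exact hall z hz'
      · intro hall z hz
        exact hall z (List.mem_cons_of_mem _ hz)
    · rw [if_neg hx]
      rw [ih m]
      by_cases hm : ∀ z ∈ m :: x :: t', key z ≤ key m
      · have hm' : ∀ z ∈ m :: t', key z ≤ key m := fun z hz => hm z (by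
          rcases List.mem_cons.mp hz with rfl | hz'
          · simp
          · simp [hz'])
        conv_rhs => rw [List.find?]
        rw [decide_eq_true hm]
        conv_lhs => rw [List.find?]
        rw [decide_eq_true hm']
      · have hnot2 : (decide (∀ z ∈ m :: t', key z ≤ key m)) = false := by
          simp only [decide_eq_false_iff_not]
          intro hall
          apply hm
          intro z hz
          rcases List.mem_cons.mp hz with rfl | hz'
          · exact hall _ List.mem_cons_self
          · rcases List.mem_cons.mp hz' with rfl | hz''
            · exact le_trans (not_lt.mp hx) (hall _ List.mem_cons_self)
            · exact hall z (by simp [hz''])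
        have hnot1 : (decide (∀ z ∈ m :: x :: t', key z ≤ key m)) = false := by
          simp only [decide_eq_false_iff_not]; exact hm
        have hnotx : (decide (∀ z ∈ m :: x :: t', key z ≤ key x)) = false := by
          simp only [decide_eq_false_iff_not]
          intro hall
          apply hm
          intro z hz
          exact le_trans (hall z hz) (not_lt.mp hx)
        conv_rhs => rw [List.find?]
        rw [hnot1]
        conv_rhs => rw [List.find?]
        rw [hnotx]
        conv_lhs => rw [List.find?]
        rw [hnot2]
        apply pvFindCongr
        intro y hy
        apply decide_eq_decide.mpr
        constructor
        · intro hall z hz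
          rcases List.mem_cons.mp hz with rfl | hz'
          · exact hall _ List.mem_cons_self
          · rcases List.mem_cons.mp hz' with rfl | hz''
            · exact le_trans (not_lt.mp hx) (hall _ List.mem_cons_self)
            · exact hall z (by simp [hz''])
        · intro hall z hz
          rcases List.mem_cons.mp hz with rfl | hz'
          · exact hall _ List.mem_cons_self
          · exact hall z (by simp [hz'])

theorem pvRk_eq (s : String) : pvRank.getD s 0 = if s = "video_call" then 5 else if s = "phone_use" then 4 else if s = "eating_drinking" then 3 else if s = "meeting" then 2 else if s = "using_computer" then 1 else 0 := by
  by_cases h1 : "video_call" = s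
  · subst h1; decide
  by_cases h2 : "phone_use" = s
  · subst h2; decide
  by_cases h3 : "eating_drinking" = s
  · subst h3; decide
  by_cases h4 : "meeting" = s
  · subst h4; decide
  by_cases h5 : "using_computer" = s
  · subst h5; decide
  have h : pvRank = PySem.Dict.mk
    [("video_call", 5), ("phone_use", 4), ("eating_drinking", 3), ("meeting", 2), ("using_computer", 1)] := by decide
  simp [h, PySem.Dict.getD, PySem.Dict.get?,
    h1, h2, h3, h4, h5, Ne.symm h1, Ne.symm h2, Ne.symm h3, Ne.symm h4, Ne.symm h5]


theorem pvFoldIsSome {α κ : Type} [LinearOrder κ] (key : α → κ) :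
    ∀ (t : List α) (m : α),
      (t.foldl (fun acc x => match acc with
        | none => some x
        | some mm => if key mm < key x then some x else some mm) (some m)).isSome := by
  intro t
  induction t with
  | nil => intro m; rfl
  | cons x t' ih =>
    intro m
    simp only [List.foldl]
    by_cases hx : key m < key x
    · rw [if_pos hx]; exact ih x
    · rw [if_neg hx]; exact ih m

theorem pvMaxChar {α : Type} (key : α → Int) (xs : List α) (hne : xs ≠ []) :
    PySem.List.max? xs key = xs.find? (fun y => decide (∀ z ∈ xs, key z ≤ key y)) := by
  cases xs with
  | nil => exact absurd rfl hne
  | cons x t =>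
    show List.foldl _ (some x) t = _
    exact pvArgmaxFold key t x

theorem pvLexStep (a b c d : Int) :
    ((decide (a < c) || !decide (c < a) && decide (b < d)) = true)
      ↔ (toLex (a, b) < toLex (c, d)) := by
  rw [Prod.Lex.toLex_lt_toLex]
  simp only [Bool.or_eq_true, Bool.and_eq_true, Bool.not_eq_true', decide_eq_true_eq,
    decide_eq_false_iff_not]
  constructor
  · rintro (h | ⟨h1, h2⟩)
    · exact Or.inl h
    · rcases lt_trichotomy a c with h' | h' | h'
      · exact Or.inl h'
      · exact Or.inr ⟨h', h2⟩
      · exact absurd h' h1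
  · rintro (h | ⟨h1, h2⟩)
    · exact Or.inl h
    · exact Or.inr ⟨by omega, h2⟩

theorem pvMax2Char {α : Type} (k1 k2 : α → Int) (xs : List α) (hne : xs ≠ []) :
    PySem.List.max2? xs k1 k2
      = xs.find? (fun y => decide (∀ z ∈ xs, toLex (k1 z, k2 z) ≤ toLex (k1 y, k2 y))) := by
  cases xs with
  | nil => exact absurd rfl hne
  | cons x t =>
    show List.foldl _ (some x) t = _
    have hext : List.foldl
        (fun (acc : Option α) x => match acc with
          | none => some x
          | some m => if (decide (k1 m < k1 x) || !decide (k1 x < k1 m) && decide (k2 m < k2 x)) = true then some x else some m)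
        (some x) t
      = List.foldl
        (fun (acc : Option α) x => match acc with
          | none => some x
          | some mm => if (toLex (k1 mm, k2 mm) : Lex (Int × Int)) < toLex (k1 x, k2 x) then some x else some mm)
        (some x) t := by
      apply List.foldl_ext
      intro acc y _
      cases acc with
      | none => rfl
      | some m =>
        show (if (decide (k1 m < k1 y) || !decide (k1 y < k1 m) && decide (k2 m < k2 y)) = true
              then some y else some m)
            = (if (toLex (k1 m, k2 m) : Lex (Int × Int)) < toLex (k1 y, k2 y) then some y else some m)
        by_cases hc : (toLex (k1 m, k2 m) : Lex (Int × Int)) < toLex (k1 y, k2 y)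
        · rw [if_pos ((pvLexStep _ _ _ _).mpr hc), if_pos hc]
        · rw [if_neg (fun hb => hc ((pvLexStep _ _ _ _).mp hb)), if_neg hc]
    exact hext.trans (pvArgmaxFold (fun y => (toLex (k1 y, k2 y) : Lex (Int × Int))) t x)

theorem pvRkUnique (s t : String) (h1 : 1 ≤ pvRank.getD s 0)
    (h : pvRank.getD s 0 = pvRank.getD t 0) : s = t := by
  rw [pvRk_eq] at h1
  rw [pvRk_eq, pvRk_eq] at h
  split_ifs at h1 h <;> simp_all

theorem pvFindArgmaxIsSome {α κ : Type} [LinearOrder κ] (key : α → κ) (x : α) (t : List α) :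
    ((x :: t).find? (fun y => decide (∀ z ∈ x :: t, key z ≤ key y))).isSome := by
  rw [← pvArgmaxFold key t x]
  exact pvFoldIsSome key t x

-- ===== VERDICT (by name: the statement is the Claim_ definition above) =====
theorem pick_closest_label_spec : Claim_equal_pick_closest_label := by
  intro xs _hdom hpre
  unfold Spec_pick_closest_label pick_closest_label pick_closest_label_alt
  cases ha : PySem.List.max? xs (fun kv => kv.2) with
  | none => exact absurd ((PySem.List.max?_eq_none_iff xs (fun kv => kv.2)).mp ha) hpre
  | some a =>
    cases hb : PySem.List.max2? xs (fun kv => kv.2) (fun kv => pvRank.getD kv.1 0) with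
    | none =>
      rw [pvMax2Char _ _ _ hpre] at hb
      obtain ⟨x, t, rfl⟩ := List.exists_cons_of_ne_nil hpre
      have hs := pvFindArgmaxIsSome (fun y : String × Int => (toLex (y.2, pvRank.getD y.1 0) : Lex (Int × Int))) x t
      rw [hb] at hs
      exact absurd hs (by simp)
    | some b =>
      have hA : PySem.List.max? xs (fun kv => kv.2)
          = xs.find? (fun y => decide (∀ z ∈ xs, z.2 ≤ y.2)) :=
        pvMaxChar (fun kv : String × Int => kv.2) xs hpre
      have hB := pvMax2Char (fun kv : String × Int => kv.2) (fun kv => pvRank.getD kv.1 0) xs hpre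
      have ha' : xs.find? (fun y => decide (∀ z ∈ xs, z.2 ≤ y.2)) = some a := by
        rw [← hA]; exact ha
      have hb' : xs.find? (fun y => decide (∀ z ∈ xs,
          (toLex (z.2, pvRank.getD z.1 0) : Lex (Int × Int)) ≤ toLex (y.2, pvRank.getD y.1 0)))
          = some b := by
        rw [← hB]; exact hb
      have hamem : a ∈ xs := List.mem_of_find?_eq_some ha'
      have hbmem : b ∈ xs := List.mem_of_find?_eq_some hb'
      have haP : ∀ z ∈ xs, z.2 ≤ a.2 := by simpa using List.find?_some ha'
      have hbP : ∀ z ∈ xs, (toLex (z.2, pvRank.getD z.1 0) : Lex (Int × Int))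
          ≤ toLex (b.2, pvRank.getD b.1 0) := by
        simpa using List.find?_some hb'
      have hscore : b.2 = a.2 := by
        have h1 := haP b hbmem
        have h2 := hbP a hamem
        rw [Prod.Lex.toLex_le_toLex] at h2
        rcases h2 with h2 | ⟨h2, _⟩ <;> omega
      show (if (a.2 == 0) = true then "using_computer"
          else match List.find?
              (fun lab => (List.map (fun kv : String × Int => kv.1)
                (List.filter (fun kv => kv.2 == a.2) xs)).contains lab)
              ["video_call", "phone_use", "eating_drinking", "meeting", "using_computer"] with
            | some lab => lab
            | none => a.1)
          = (if (b.2 == 0) = true then "using_computer" else b.1)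
      rw [hscore]
      by_cases hz : a.2 = 0
      · simp [hz]
      · rw [if_neg (by simp [hz]), if_neg (by simp [hz])]
        show (match List.find?
            (fun lab => (List.map (fun kv => kv.1) (List.filter (fun kv => kv.2 == a.2) xs)).contains lab)
            ["video_call", "phone_use", "eating_drinking", "meeting", "using_computer"] with
          | some lab => lab
          | none => a.1) = b.1
        set tied := List.map (fun kv : String × Int => kv.1) (List.filter (fun kv => kv.2 == a.2) xs)
          with htied
        have hcont : ∀ lab : String, tied.contains lab = true
            ↔ ∃ z, z ∈ xs ∧ z.1 = lab ∧ z.2 = a.2 := by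
          intro lab
          rw [htied]
          simp only [List.contains_iff_mem, List.mem_map, List.mem_filter, beq_iff_eq]
          constructor
          · rintro ⟨z, ⟨hzx, hz2⟩, hz1⟩
            exact ⟨z, hzx, hz1, hz2⟩
          · rintro ⟨z, hzx, hz1, hz2⟩
            exact ⟨z, ⟨hzx, hz2⟩, hz1⟩
        cases hv1 : tied.contains "video_call" with
        | true =>
          simp only [List.find?, hv1]
          obtain ⟨z, hzx, hz1, hz2⟩ := (hcont "video_call").mp hv1
          have hle : pvRank.getD "video_call" 0 ≤ pvRank.getD b.1 0 := by
            have hh := hbP z hzx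
            rw [Prod.Lex.toLex_le_toLex] at hh
            rcases hh with h | ⟨_, h⟩
            · exfalso; omega
            · rw [hz1] at h; exact h
          have hbt : tied.contains b.1 = true := (hcont b.1).mpr ⟨b, hbmem, rfl, hscore⟩
          have hub : pvRank.getD b.1 0 ≤ 5 := by
            rw [pvRk_eq]; split_ifs <;> omega
          have hrkv : pvRank.getD "video_call" 0 = 5 := by decide
          exact pvRkUnique "video_call" b.1 (by decide) (by omega)
        | false =>
        cases hv2 : tied.contains "phone_use" with
        | true =>
          simp only [List.find?, hv1, hv2]
          obtain ⟨z, hzx, hz1, hz2⟩ := (hcont "phone_use").mp hv2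
          have hle : pvRank.getD "phone_use" 0 ≤ pvRank.getD b.1 0 := by
            have hh := hbP z hzx
            rw [Prod.Lex.toLex_le_toLex] at hh
            rcases hh with h | ⟨_, h⟩
            · exfalso; omega
            · rw [hz1] at h; exact h
          have hbt : tied.contains b.1 = true := (hcont b.1).mpr ⟨b, hbmem, rfl, hscore⟩
          have hne1 : b.1 ≠ "video_call" := by
            intro he; rw [he, hv1] at hbt; exact Bool.false_ne_true hbt
          have hub : pvRank.getD b.1 0 ≤ 4 := by
            rw [pvRk_eq]; split_ifs <;> first | omega | simp_all
          have hrkv : pvRank.getD "phone_use" 0 = 4 := by decide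
          exact pvRkUnique "phone_use" b.1 (by decide) (by omega)
        | false =>
        cases hv3 : tied.contains "eating_drinking" with
        | true =>
          simp only [List.find?, hv1, hv2, hv3]
          obtain ⟨z, hzx, hz1, hz2⟩ := (hcont "eating_drinking").mp hv3
          have hle : pvRank.getD "eating_drinking" 0 ≤ pvRank.getD b.1 0 := by
            have hh := hbP z hzx
            rw [Prod.Lex.toLex_le_toLex] at hh
            rcases hh with h | ⟨_, h⟩
            · exfalso; omega
            · rw [hz1] at h; exact h
          have hbt : tied.contains b.1 = true := (hcont b.1).mpr ⟨b, hbmem, rfl, hscore⟩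
          have hne1 : b.1 ≠ "video_call" := by
            intro he; rw [he, hv1] at hbt; exact Bool.false_ne_true hbt
          have hne2 : b.1 ≠ "phone_use" := by
            intro he; rw [he, hv2] at hbt; exact Bool.false_ne_true hbt
          have hub : pvRank.getD b.1 0 ≤ 3 := by
            rw [pvRk_eq]; split_ifs <;> first | omega | simp_all
          have hrkv : pvRank.getD "eating_drinking" 0 = 3 := by decide
          exact pvRkUnique "eating_drinking" b.1 (by decide) (by omega)
        | false =>
        cases hv4 : tied.contains "meeting" with
        | true =>
          simp only [List.find?, hv1, hv2, hv3, hv4]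
          obtain ⟨z, hzx, hz1, hz2⟩ := (hcont "meeting").mp hv4
          have hle : pvRank.getD "meeting" 0 ≤ pvRank.getD b.1 0 := by
            have hh := hbP z hzx
            rw [Prod.Lex.toLex_le_toLex] at hh
            rcases hh with h | ⟨_, h⟩
            · exfalso; omega
            · rw [hz1] at h; exact h
          have hbt : tied.contains b.1 = true := (hcont b.1).mpr ⟨b, hbmem, rfl, hscore⟩
          have hne1 : b.1 ≠ "video_call" := by
            intro he; rw [he, hv1] at hbt; exact Bool.false_ne_true hbt
          have hne2 : b.1 ≠ "phone_use" := by
            intro he; rw [he, hv2] at hbt; exact Bool.false_ne_true hbt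
          have hne3 : b.1 ≠ "eating_drinking" := by
            intro he; rw [he, hv3] at hbt; exact Bool.false_ne_true hbt
          have hub : pvRank.getD b.1 0 ≤ 2 := by
            rw [pvRk_eq]; split_ifs <;> first | omega | simp_all
          have hrkv : pvRank.getD "meeting" 0 = 2 := by decide
          exact pvRkUnique "meeting" b.1 (by decide) (by omega)
        | false =>
        cases hv5 : tied.contains "using_computer" with
        | true =>
          simp only [List.find?, hv1, hv2, hv3, hv4, hv5]
          obtain ⟨z, hzx, hz1, hz2⟩ := (hcont "using_computer").mp hv5
          have hle : pvRank.getD "using_computer" 0 ≤ pvRank.getD b.1 0 := by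
            have hh := hbP z hzx
            rw [Prod.Lex.toLex_le_toLex] at hh
            rcases hh with h | ⟨_, h⟩
            · exfalso; omega
            · rw [hz1] at h; exact h
          have hbt : tied.contains b.1 = true := (hcont b.1).mpr ⟨b, hbmem, rfl, hscore⟩
          have hne1 : b.1 ≠ "video_call" := by
            intro he; rw [he, hv1] at hbt; exact Bool.false_ne_true hbt
          have hne2 : b.1 ≠ "phone_use" := by
            intro he; rw [he, hv2] at hbt; exact Bool.false_ne_true hbt
          have hne3 : b.1 ≠ "eating_drinking" := by
            intro he; rw [he, hv3] at hbt; exact Bool.false_ne_true hbt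
          have hne4 : b.1 ≠ "meeting" := by
            intro he; rw [he, hv4] at hbt; exact Bool.false_ne_true hbt
          have hub : pvRank.getD b.1 0 ≤ 1 := by
            rw [pvRk_eq]; split_ifs <;> first | omega | simp_all
          have hrkv : pvRank.getD "using_computer" 0 = 1 := by decide
          exact pvRkUnique "using_computer" b.1 (by decide) (by omega)
        | false =>
          simp only [List.find?, hv1, hv2, hv3, hv4, hv5]
          have hall0 : ∀ z ∈ xs, z.2 = a.2 → pvRank.getD z.1 0 = 0 := by
            intro z hzx hz2
            by_contra hnz
            have hzt : tied.contains z.1 = true := (hcont z.1).mpr ⟨z, hzx, rfl, hz2⟩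
            rw [pvRk_eq] at hnz
            split_ifs at hnz with e1 e2 e3 e4 e5
            · rw [e1, hv1] at hzt; exact Bool.false_ne_true hzt
            · rw [e2, hv2] at hzt; exact Bool.false_ne_true hzt
            · rw [e3, hv3] at hzt; exact Bool.false_ne_true hzt
            · rw [e4, hv4] at hzt; exact Bool.false_ne_true hzt
            · rw [e5, hv5] at hzt; exact Bool.false_ne_true hzt
            · exact hnz rfl
          have hfeq : xs.find? (fun y => decide (∀ z ∈ xs, z.2 ≤ y.2))
              = xs.find? (fun y => decide (∀ z ∈ xs,
                (toLex (z.2, pvRank.getD z.1 0) : Lex (Int × Int)) ≤ toLex (y.2, pvRank.getD y.1 0))) := by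
            apply pvFindCongr
            intro y hy
            apply decide_eq_decide.mpr
            constructor
            · intro hpa z hz
              have hy2 : y.2 = a.2 := le_antisymm (haP y hy) (hpa a hamem)
              rw [Prod.Lex.toLex_le_toLex]
              rcases lt_or_eq_of_le (hpa z hz) with h | h
              · exact Or.inl h
              · refine Or.inr ⟨h, ?_⟩
                rw [hall0 z hz (by omega), hall0 y hy hy2]
            · intro hpb z hz
              have hh := hpb z hz
              rw [Prod.Lex.toLex_le_toLex] at hh
              rcases hh with h | ⟨h, _⟩
              · exact le_of_lt h
              · exact le_of_eq h
          have hab : some a = some b := by rw [← ha', hfeq, hb']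
          rw [Option.some.injEq] at hab
          rw [hab]
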